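-- pv_equiv track=rewrite | github.com/RosettaCommons/rosetta | source/src/apps/public/DRRAFTER/DRRAFTER_util.py | make_tag_with_dashes
-- ===== SOURCE A (Python) =====
-- def make_tag_with_dashes( int_vector, char_vector = 0 ):
--     tag = ''
--     if not isinstance( char_vector, list ) or len( char_vector ) == 0:
--          char_vector = []
--          for m in range( len( int_vector ) ): char_vector.append( '' )
--     assert( len( char_vector ) == len( int_vector ) )
--
--     start_res = int_vector[0]
--     for i in range( 1, len(int_vector)+1 ):
--         if i==len( int_vector)  or \
--                 int_vector[i] != int_vector[i-1]+1 or \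
--                 char_vector[i] != char_vector[i-1] :
--
--             stop_res = int_vector[i-1]
--             tag += ' '
--             if len( char_vector[i-1] ) > 0:
--                 assert( len( char_vector[i-1] ) == 1 )
--                 tag += char_vector[i-1]+':'
--             if stop_res > start_res:
--                 tag += '%d-%d' % (start_res, stop_res )
--             else:
--                 tag += '%d' % (stop_res )
--
--             if ( i < len( int_vector) ): start_res = int_vector[i]
--
--     return tag
-- ===== SOURCE B (Python) =====
-- def make_tag_with_dashes(int_vector, char_vector=0):
--     if not isinstance(char_vector, list) or len(char_vector) == 0:
--         char_vector = [''] * len(int_vector)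
--     assert len(char_vector) == len(int_vector)
--
--     # pass 1: group into runs (start_res, stop_res, char)
--     runs = []
--     cur = None
--     for res, ch in zip(int_vector, char_vector):
--         if cur is not None and res == cur[1] + 1 and ch == cur[2]:
--             cur = (cur[0], res, ch)
--         else:
--             if cur is not None:
--                 runs.append(cur)
--             cur = (res, res, ch)
--     if cur is not None:
--         runs.append(cur)
--
--     # pass 2: format each run
--     pieces = []
--     for start, stop, ch in runs:
--         piece = ' '
--         if ch:
--             assert len(ch) == 1
--             piece += ch + ':'
--         piece += '%d-%d' % (start, stop) if stop > start else '%d' % stop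
--         pieces.append(piece)
--     return ''.join(pieces)
-- ===== Notes on version B (the rewrite author's own statement) =====
-- stated objective: simpler
-- what changed: A's single index-loop that tests boundaries with int_vector[i]/int_vector[i-1] and mutates tag and start_res in place is replaced by a two-pass decomposition: one zip pass grouping the residues into runs (start, stop, char), then an independent formatting pass joined together.
import Mathlib
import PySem

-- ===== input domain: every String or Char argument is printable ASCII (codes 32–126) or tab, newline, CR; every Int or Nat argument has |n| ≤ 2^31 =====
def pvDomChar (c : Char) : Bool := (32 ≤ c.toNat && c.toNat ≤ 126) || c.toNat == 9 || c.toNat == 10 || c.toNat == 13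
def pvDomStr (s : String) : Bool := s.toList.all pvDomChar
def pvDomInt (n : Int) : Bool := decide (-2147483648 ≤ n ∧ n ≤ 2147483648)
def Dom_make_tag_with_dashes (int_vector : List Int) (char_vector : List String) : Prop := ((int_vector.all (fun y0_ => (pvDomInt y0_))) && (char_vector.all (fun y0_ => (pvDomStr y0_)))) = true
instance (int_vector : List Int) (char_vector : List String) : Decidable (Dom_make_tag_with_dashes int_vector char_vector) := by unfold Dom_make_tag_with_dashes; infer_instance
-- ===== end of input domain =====

-- B replaces A's single index-boundary emission loop by a grouping pass into runs
-- followed by an independent formatting pass (objective: simpler decomposition, same cost).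

-- ===== PORT A =====
-- the loop body of A's single for-loop; state = (tag, start_res)
-- (A's asserts are raises: the inputs reaching them are excluded by Pre_ below)
def mtdBodyA (xs : List Int) (cv : List String) (st : String × Int) (i : Int) : String × Int :=
  if i = (xs.length : Int)
      ∨ PySem.List.pyGetD xs i 0 ≠ PySem.List.pyGetD xs (i - 1) 0 + 1
      ∨ PySem.List.pyGetD cv i "" ≠ PySem.List.pyGetD cv (i - 1) "" then
    let stop_res := PySem.List.pyGetD xs (i - 1) 0
    let tag := st.1 ++ " "
    let tag := if PySem.Str.len (PySem.List.pyGetD cv (i - 1) "") > 0 then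
        tag ++ PySem.List.pyGetD cv (i - 1) "" ++ ":"
      else tag
    let tag := if stop_res > st.2 then
        tag ++ PySem.Int.toStr st.2 ++ "-" ++ PySem.Int.toStr stop_res
      else tag ++ PySem.Int.toStr stop_res
    let start_res := if i < (xs.length : Int) then PySem.List.pyGetD xs i 0 else st.2
    (tag, start_res)
  else st

def make_tag_with_dashes (int_vector : List Int) (char_vector : List String) : String :=
  let char_vector := if char_vector.length = 0 then
      (List.range int_vector.length).foldl (fun acc _ => acc ++ [""]) []
    else char_vector
  let start_res : Int := PySem.List.pyGetD int_vector 0 0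
  ((PySem.List.pyRange 1 ((int_vector.length : Int) + 1) 1).foldl
      (mtdBodyA int_vector char_vector) ("", start_res)).1

-- ===== PORT B =====
-- grouping-pass step: state = (runs, cur), cur = None or the open run (start, stop, char)
def mtdStep (st : List (Int × Int × String) × Option (Int × Int × String))
    (p : Int × String) : List (Int × Int × String) × Option (Int × Int × String) :=
  match st.2 with
  | some (s, e, c) =>
      if p.1 = e + 1 ∧ p.2 = c then (st.1, some (s, p.1, c))
      else (st.1 ++ [(s, e, c)], some (p.1, p.1, p.2))
  | none => (st.1, some (p.1, p.1, p.2))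

-- final 'if cur is not None: runs.append(cur)'
def mtdFlush (st : List (Int × Int × String) × Option (Int × Int × String)) :
    List (Int × Int × String) :=
  match st.2 with
  | some cur => st.1 ++ [cur]
  | none => st.1

-- formatting pass for one run (the len==1 assert is a raise, excluded by Pre_)
def mtdPiece (run : Int × Int × String) : String :=
  let piece := " "
  let piece := if run.2.2 ≠ "" then piece ++ run.2.2 ++ ":" else piece
  piece ++ (if run.2.1 > run.1 then
      PySem.Int.toStr run.1 ++ "-" ++ PySem.Int.toStr run.2.1
    else PySem.Int.toStr run.2.1)

def make_tag_with_dashes_alt (int_vector : List Int) (char_vector : List String) : String :=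
  let char_vector := if char_vector.length = 0 then
      List.replicate int_vector.length "" else char_vector
  let runs := mtdFlush ((int_vector.zip char_vector).foldl mtdStep ([], none))
  PySem.Str.join "" (runs.map mtdPiece)

-- ===== PRECONDITION & SPEC =====
-- Pre_ excludes exactly the inputs on which A raises: an empty int_vector (IndexError on
-- int_vector[0]), a nonempty char_vector whose length differs from int_vector's (AssertionError),
-- and a char entry longer than one character (AssertionError at its run's boundary).
def Pre_make_tag_with_dashes (int_vector : List Int) (char_vector : List String) : Prop :=
  int_vector ≠ [] ∧
    (char_vector = [] ∨
      (char_vector.length = int_vector.length ∧ ∀ s ∈ char_vector, PySem.Str.len s ≤ 1))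
instance (int_vector : List Int) (char_vector : List String) :
    Decidable (Pre_make_tag_with_dashes int_vector char_vector) := by
  unfold Pre_make_tag_with_dashes; infer_instance

def pvWitness_make_tag_with_dashes : List Int × List String := ([1, 2, 5], ["A", "A", "B"])

def Spec_make_tag_with_dashes (int_vector : List Int) (char_vector : List String)
    (out : String) : Prop := out = make_tag_with_dashes_alt int_vector char_vector
instance (int_vector : List Int) (char_vector : List String) (out : String) :
    Decidable (Spec_make_tag_with_dashes int_vector char_vector out) := by
  unfold Spec_make_tag_with_dashes; infer_instance

-- ===== CLAIM (what is proved, stated in full; the proofs are below) =====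
def Claim_equal_make_tag_with_dashes : Prop := ∀ (int_vector : List Int) (char_vector : List String), Dom_make_tag_with_dashes int_vector char_vector → Pre_make_tag_with_dashes int_vector char_vector → Spec_make_tag_with_dashes int_vector char_vector (make_tag_with_dashes int_vector char_vector)


-- ===== LEMMAS AND PROOFS =====

theorem join_empty_nil : PySem.Str.join "" ([] : List String) = "" := by
  apply String.toList_inj.mp
  simp [PySem.Str.toList_join, PySem.Chars.join, List.intercalate]

theorem join_empty_cons (a : String) (l : List String) :
    PySem.Str.join "" (a :: l) = a ++ PySem.Str.join "" l := by
  apply String.toList_inj.mp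
  cases l <;>
    simp [PySem.Str.toList_join, String.toList_append, PySem.Chars.join, List.intercalate]

theorem len_pos_iff (s : String) : (PySem.Str.len s > 0) ↔ s ≠ "" := by
  constructor
  · rintro h rfl; simp [PySem.Str.len] at h
  · intro h
    have h2 : s.toList ≠ [] := fun hh => h (String.toList_inj.mp (by simp [hh]))
    simpa [PySem.Str.len] using List.length_pos_iff.mpr h2

theorem pyGetD_app {α : Type} (l1 : List α) (a : α) (l2 : List α) (d : α) :
    PySem.List.pyGetD (l1 ++ a :: l2) (l1.length : Int) d = a := by
  simp [PySem.List.pyGetD_natCast, List.getD]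

theorem pyGetD_app1 {α : Type} (l1 : List α) (a b : α) (l2 : List α) (d : α) :
    PySem.List.pyGetD (l1 ++ a :: b :: l2) ((l1.length : Int) + 1) d = b := by
  have : ((l1.length : Int) + 1) = ((l1.length + 1 : Nat) : Int) := by push_cast; ring
  rw [this, PySem.List.pyGetD_natCast]
  simp [List.getD]

-- the runs of the tail, given the open run (s, e, c)
def runsFrom (s e : Int) (c : String) : List (Int × String) → List (Int × Int × String)
  | [] => [(s, e, c)]
  | (r, ch) :: tl =>
      if r = e + 1 ∧ ch = c then runsFrom s r c tl
      else (s, e, c) :: runsFrom r r ch tl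

theorem mtd_fold_some (rest : List (Int × String)) :
    ∀ (runs : List (Int × Int × String)) (s e : Int) (c : String),
      mtdFlush (rest.foldl mtdStep (runs, some (s, e, c))) = runs ++ runsFrom s e c rest := by
  induction rest with
  | nil => intro runs s e c; simp [mtdFlush, runsFrom]
  | cons p tl ih =>
      intro runs s e c
      obtain ⟨r, ch⟩ := p
      by_cases h : r = e + 1 ∧ ch = c
      · rw [List.foldl_cons]
        simp only [mtdStep, if_pos h]
        rw [ih, runsFrom, if_pos h]
      · rw [List.foldl_cons]
        simp only [mtdStep, if_neg h]
        rw [ih, runsFrom, if_neg h]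
        simp

theorem emit_eq (tag : String) (start stop : Int) (c : String) :
    (let tag1 := tag ++ " "
     let tag2 := if PySem.Str.len c > 0 then tag1 ++ c ++ ":" else tag1
     (if stop > start then tag2 ++ PySem.Int.toStr start ++ "-" ++ PySem.Int.toStr stop
      else tag2 ++ PySem.Int.toStr stop))
    = tag ++ mtdPiece (start, stop, c) := by
  simp only [mtdPiece, len_pos_iff]
  by_cases hc : c = "" <;> by_cases hs : stop > start <;>
    simp [hc, hs, String.append_assoc]

theorem mtd_loop (rest : List (Int × String)) :
    ∀ (pre : List (Int × String)) (a : Int × String) (tag : String) (start : Int),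
      ((PySem.List.pyRange ((pre.length : Int) + 1) (((pre ++ a :: rest).length : Int) + 1) 1).foldl
          (mtdBodyA ((pre ++ a :: rest).map Prod.fst) ((pre ++ a :: rest).map Prod.snd))
          (tag, start)).1
      = tag ++ PySem.Str.join "" ((runsFrom start a.1 a.2 rest).map mtdPiece) := by
  induction rest with
  | nil =>
      intro pre a tag start
      have hn : (((pre ++ a :: []).length : Int)) = (pre.length : Int) + 1 := by simp
      have hr : PySem.List.pyRange ((pre.length : Int) + 1)
            (((pre ++ a :: []).length : Int) + 1) 1 = [((pre.length : Int) + 1)] := by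
        rw [hn, PySem.List.pyRange_one_singleton]
      have hx : (pre ++ a :: []).map Prod.fst = pre.map Prod.fst ++ a.1 :: [] := by simp
      have hc : (pre ++ a :: []).map Prod.snd = pre.map Prod.snd ++ a.2 :: [] := by simp
      have hi : ((pre.length : Int) + 1 - 1) = (pre.length : Int) := by ring
      have e1 : PySem.List.pyGetD ((pre ++ a :: []).map Prod.fst) ((pre.length : Int)) 0
          = a.1 := by rw [hx]; simpa using pyGetD_app (pre.map Prod.fst) a.1 [] 0
      have e2 : PySem.List.pyGetD ((pre ++ a :: []).map Prod.snd) ((pre.length : Int)) ""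
          = a.2 := by rw [hc]; simpa using pyGetD_app (pre.map Prod.snd) a.2 [] ""
      rw [hr]
      simp only [List.foldl_cons, List.foldl_nil, mtdBodyA]
      rw [if_pos (by left; simp)]
      simp only [hi, e1, e2]
      rw [runsFrom]
      simp only [List.map_cons, List.map_nil, join_empty_cons, join_empty_nil]
      have := emit_eq tag start a.1 a.2
      simp only at this ⊢
      rw [this]
      simp
  | cons p tl ih =>
      intro pre a tag start
      obtain ⟨r, ch⟩ := p
      have hlt : ((pre.length : Int) + 1) < (((pre ++ a :: (r, ch) :: tl).length : Int) + 1) := by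
        simp only [List.length_append, List.length_cons]; push_cast; omega
      have hlt2 : ((pre.length : Int) + 1)
          < ((((pre ++ a :: (r, ch) :: tl).map Prod.fst).length : Int)) := by
        simp only [List.length_map, List.length_append, List.length_cons]; push_cast; omega
      have hne : ((pre.length : Int) + 1)
          ≠ ((((pre ++ a :: (r, ch) :: tl).map Prod.fst).length : Int)) := by
        simp only [List.length_map, List.length_append, List.length_cons]; push_cast; omega
      have hx : (pre ++ a :: (r, ch) :: tl).map Prod.fst
          = pre.map Prod.fst ++ a.1 :: r :: tl.map Prod.fst := by simp
      have hc : (pre ++ a :: (r, ch) :: tl).map Prod.snd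
          = pre.map Prod.snd ++ a.2 :: ch :: tl.map Prod.snd := by simp
      have hi : ((pre.length : Int) + 1 - 1) = (pre.length : Int) := by ring
      have e1 : PySem.List.pyGetD ((pre ++ a :: (r, ch) :: tl).map Prod.fst)
          ((pre.length : Int)) 0 = a.1 := by
        rw [hx]; simpa using pyGetD_app (pre.map Prod.fst) a.1 (r :: tl.map Prod.fst) 0
      have e2 : PySem.List.pyGetD ((pre ++ a :: (r, ch) :: tl).map Prod.snd)
          ((pre.length : Int)) "" = a.2 := by
        rw [hc]; simpa using pyGetD_app (pre.map Prod.snd) a.2 (ch :: tl.map Prod.snd) ""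
      have f1 : PySem.List.pyGetD ((pre ++ a :: (r, ch) :: tl).map Prod.fst)
          ((pre.length : Int) + 1) 0 = r := by
        rw [hx]; simpa using pyGetD_app1 (pre.map Prod.fst) a.1 r (tl.map Prod.fst) 0
      have f2 : PySem.List.pyGetD ((pre ++ a :: (r, ch) :: tl).map Prod.snd)
          ((pre.length : Int) + 1) "" = ch := by
        rw [hc]; simpa using pyGetD_app1 (pre.map Prod.snd) a.2 ch (tl.map Prod.snd) ""
      -- restate the IH at pre' = pre ++ [a]
      have ih' := ih (pre ++ [a]) (r, ch)
      have happ : (pre ++ [a]) ++ (r, ch) :: tl = pre ++ a :: (r, ch) :: tl := by simp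
      have hlen' : (((pre ++ [a]).length : Int) + 1) = ((pre.length : Int) + 1) + 1 := by
        simp only [List.length_append, List.length_cons, List.length_nil]; push_cast; omega
      rw [happ, hlen'] at ih'
      rw [PySem.List.pyRange_one_cons hlt, List.foldl_cons]
      by_cases h : r = a.1 + 1 ∧ ch = a.2
      · -- run continues: boundary test is false, state unchanged
        have hbody : mtdBodyA ((pre ++ a :: (r, ch) :: tl).map Prod.fst)
            ((pre ++ a :: (r, ch) :: tl).map Prod.snd) (tag, start)
            ((pre.length : Int) + 1) = (tag, start) := by
          rw [mtdBodyA, if_neg]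
          push_neg
          refine ⟨hne, ?_, ?_⟩
          · rw [hi, e1, f1]; exact h.1
          · rw [hi, e2, f2]; exact h.2
        rw [hbody, ih' tag start, runsFrom, if_pos h]
        simp [h.2]
      · -- boundary: emit a piece, start over at r
        have hbody : mtdBodyA ((pre ++ a :: (r, ch) :: tl).map Prod.fst)
            ((pre ++ a :: (r, ch) :: tl).map Prod.snd) (tag, start)
            ((pre.length : Int) + 1)
            = (tag ++ mtdPiece (start, a.1, a.2), r) := by
          rw [mtdBodyA, if_pos]
          · simp only [hi, e1, e2, f1, f2, if_pos hlt2]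
            have := emit_eq tag start a.1 a.2
            simp only at this ⊢
            rw [this]
          · rw [hi, e1, e2, f1, f2]
            rcases not_and_or.mp h with h1 | h2
            · exact Or.inr (Or.inl h1)
            · exact Or.inr (Or.inr h2)
        rw [hbody, ih' _ _, runsFrom, if_neg h]
        simp only [List.map_cons, join_empty_cons]
        rw [String.append_assoc]

theorem main_core (iv : List Int) (cveff : List String) (hne : iv ≠ [])
    (hlen : cveff.length = iv.length) :
    ((PySem.List.pyRange 1 ((iv.length : Int) + 1) 1).foldl
        (mtdBodyA iv cveff) ("", PySem.List.pyGetD iv 0 0)).1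
    = PySem.Str.join ""
        ((mtdFlush ((iv.zip cveff).foldl mtdStep ([], none))).map mtdPiece) := by
  match iv, cveff with
  | [], _ => exact absurd rfl hne
  | x :: ivt, [] => simp at hlen
  | x :: ivt, c0 :: cvt =>
    have hl : cvt.length = ivt.length := by simpa using hlen
    have hfst : ((x, c0) :: ivt.zip cvt).map Prod.fst = x :: ivt := by
      simp [List.map_fst_zip, hl.ge]
    have hsnd : ((x, c0) :: ivt.zip cvt).map Prod.snd = c0 :: cvt := by
      simp [List.map_snd_zip, hl.le]
    have hzlen : ((((x, c0) :: ivt.zip cvt).length : Int)) = (((x :: ivt).length : Int)) := by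
      simp [List.length_zip, hl]
    have lem := mtd_loop (ivt.zip cvt) [] (x, c0) "" x
    simp only [List.nil_append, List.length_nil, Nat.cast_zero, zero_add] at lem
    rw [hfst, hsnd, hzlen] at lem
    have hget : PySem.List.pyGetD (x :: ivt) (0 : Int) 0 = x := by
      simp [PySem.List.pyGetD_zero_cons]
    rw [hget, lem]
    have hstep : mtdStep ([], none) (x, c0) = ([], some (x, x, c0)) := rfl
    rw [List.zip_cons_cons, List.foldl_cons, hstep, mtd_fold_some]
    simp

-- ===== VERDICT (by name: the statement is the Claim_ definition above) =====
theorem make_tag_with_dashes_spec : Claim_equal_make_tag_with_dashes := by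
  intro iv cv _ hpre
  obtain ⟨hne, hcv⟩ := hpre
  unfold Spec_make_tag_with_dashes
  rcases hcv with rfl | ⟨hlen, _⟩
  · -- char_vector = []: both sides fill with empty strings
    have hfill : (List.range iv.length).foldl (fun acc _ => acc ++ [""]) ([] : List String)
        = List.replicate iv.length "" := by
      rw [PySem.List.foldl_append_singleton_eq_map]
      simp [List.map_const']
    simp only [make_tag_with_dashes, make_tag_with_dashes_alt, List.length_nil, if_pos rfl,
      hfill]
    exact main_core iv (List.replicate iv.length "") hne (by simp)
  · have h0 : ¬ (cv.length = 0) := by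
      intro h
      exact hne (List.length_eq_zero_iff.mp (by omega))
    simp only [make_tag_with_dashes, make_tag_with_dashes_alt, if_neg h0]
    exact main_core iv cv hne hlen
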